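-- pv_equiv track=rewrite | github.com/sudo-krish/the_last_application | src/the_ai_bit.py | _match_option
-- ===== SOURCE A (Python) =====
-- from typing import List
--
-- def _match_option(answer: str, options: List[str]) -> str:
--     """Match answer to exact dropdown/radio option"""
--     if not options:
--         return answer
--
--     answer_lower = answer.strip().lower()
--
--     # Try exact match (case-insensitive)
--     for option in options:
--         if option.strip().lower() == answer_lower:
--             return option.strip()
--
--     # Try partial match (answer contains option or vice versa)
--     for option in options:
--         option_lower = option.lower()
--         if answer_lower in option_lower or option_lower in answer_lower:
--             return option.strip()
--
--     # Try word-based fuzzy match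
--     answer_words = set(answer_lower.split())
--     best_match = None
--     best_score = 0
--
--     for option in options:
--         option_words = set(option.lower().split())
--         # Count common words
--         common_words = answer_words & option_words
--         score = len(common_words)
--
--         if score > best_score:
--             best_score = score
--             best_match = option
--
--     # Return best match or first option as fallback
--     return best_match.strip() if best_match else options[0].strip()
-- ===== SOURCE B (Python) =====
-- def _match_option(answer, options):
--     if not options:
--         return answer
--     answer_lower = answer.strip().lower()
--     answer_words = set(answer_lower.split())
--     best_option = options[0]
--     best_key = (0, 0)
--     for option in options:
--         if option.strip().lower() == answer_lower:
--             return option.strip()   # top tier; the earliest exact match wins outright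
--         if best_key >= (1, 0):
--             continue                # only an exact match could still beat best_key
--         option_lower = option.lower()
--         if answer_lower in option_lower or option_lower in answer_lower:
--             key = (1, 0)
--         else:
--             key = (0, len(answer_words & set(option_lower.split())))
--         if key > best_key:
--             best_key = key
--             best_option = option
--     return best_option.strip()
-- ===== Notes on version B (the rewrite author's own statement) =====
-- stated objective: alternative
-- what changed: Replaces A's three sequential passes over the options (exact, partial, fuzzy word-overlap) with a single loop that ranks each option by a lexicographic (tier, word-overlap) key and keeps the earliest strict maximum, returning at once on an exact match and skipping the tier tests once the best key can only be beaten by an exact match.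
import Mathlib
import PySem

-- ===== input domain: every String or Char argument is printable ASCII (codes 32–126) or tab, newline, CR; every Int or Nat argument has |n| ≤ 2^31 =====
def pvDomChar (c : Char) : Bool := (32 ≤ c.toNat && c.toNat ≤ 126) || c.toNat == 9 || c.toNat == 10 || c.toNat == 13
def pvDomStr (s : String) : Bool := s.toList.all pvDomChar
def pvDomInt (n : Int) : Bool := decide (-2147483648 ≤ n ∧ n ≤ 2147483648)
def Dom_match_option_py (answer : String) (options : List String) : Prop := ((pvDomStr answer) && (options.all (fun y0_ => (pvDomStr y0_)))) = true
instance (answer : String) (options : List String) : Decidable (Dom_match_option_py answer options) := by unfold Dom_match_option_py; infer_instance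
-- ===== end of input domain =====

-- B replaces A's three sequential passes by one loop keeping the earliest strict maximum of a
-- lexicographic (tier, word-overlap) key, with early return on an exact match; objective:
-- alternative (same asymptotic cost).

-- ===== PORT A =====
-- shared Python sub-expressions: option.strip().lower() == answer_lower; the partial test; the word-overlap score
def exactP (al o : String) : Bool := PySem.Str.lower (PySem.Str.strip o) == al

def partP (al o : String) : Bool :=
  PySem.Str.isIn al (PySem.Str.lower o) || PySem.Str.isIn (PySem.Str.lower o) al

def scoreW (aw : PySem.Set String) (o : String) : Int :=
  PySem.Set.len (PySem.Set.inter aw (PySem.Set.ofList (PySem.Str.split₀ (PySem.Str.lower o))))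

-- A's fuzzy-pass loop body: if score > best_score then update (best_match, best_score)
def stepA (aw : PySem.Set String) (s : Option String × Int) (o : String) : Option String × Int :=
  if scoreW aw o > s.2 then (some o, scoreW aw o) else s

def match_option_py (answer : String) (options : List String) : String :=
  match options with
  | [] => answer
  | o0 :: _ =>
    let al := PySem.Str.lower (PySem.Str.strip answer)
    match options.find? (exactP al) with
    | some o => PySem.Str.strip o
    | none =>
      match options.find? (partP al) with
      | some o => PySem.Str.strip o
      | none =>
        let aw := PySem.Set.ofList (PySem.Str.split₀ al)
        let st := options.foldl (stepA aw) (none, 0)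
        match st.1 with
        | some b => PySem.Str.strip b
        | none => PySem.Str.strip o0

-- ===== PORT B =====
-- Python tuple '>' on (int, int), lexicographic
def pyGtNN (x y : Nat × Int) : Bool := decide (y.1 < x.1) || (x.1 == y.1 && decide (y.2 < x.2))

-- B's single loop: return at the first exact match; otherwise keep the earliest strict
-- maximum of the (tier, word-overlap) key, skipping the tier tests once best_key ≥ (1,0)
def loopB (al : String) (aw : PySem.Set String) : String → (Nat × Int) → List String → String
  | b, _, [] => PySem.Str.strip b
  | b, K, o :: rest =>
    if exactP al o then PySem.Str.strip o
    else if pyGtNN (1, 0) K = false then loopB al aw b K rest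
    else
      let key := if partP al o then ((1 : Nat), (0 : Int)) else (0, scoreW aw o)
      if pyGtNN key K then loopB al aw o key rest else loopB al aw b K rest

def match_option_py_alt (answer : String) (options : List String) : String :=
  match options with
  | [] => answer
  | o0 :: _ =>
    let al := PySem.Str.lower (PySem.Str.strip answer)
    let aw := PySem.Set.ofList (PySem.Str.split₀ al)
    loopB al aw o0 (0, 0) options

-- ===== PRECONDITION & SPEC =====
def Spec_match_option_py (answer : String) (options : List String) (out : String) : Prop := out = match_option_py_alt answer options
instance (answer : String) (options : List String) (out : String) : Decidable (Spec_match_option_py answer options out) := by unfold Spec_match_option_py; infer_instance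

-- ===== CLAIM (what is proved, stated in full; the proofs are below) =====
def Claim_equal_match_option_py : Prop := ∀ (answer : String) (options : List String), Dom_match_option_py answer options → Spec_match_option_py answer options (match_option_py answer options)

-- ===== LEMMAS AND PROOFS =====

-- running into the first exact match returns it, whatever the loop state
lemma loopB_exact (al : String) (aw : PySem.Set String) (l1 l2 : List String) (e : String)
    (h : ∀ o ∈ l1, exactP al o = false) (he : exactP al e = true) :
    ∀ (b : String) (K : Nat × Int),
      loopB al aw b K (l1 ++ e :: l2) = PySem.Str.strip e := by
  induction l1 with
  | nil => intro b K; simp [loopB, he]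
  | cons o l1 ih =>
    intro b K
    have ho := h o (by simp)
    have ih' := ih (fun x hx => h x (by simp [hx]))
    simp only [List.cons_append, loopB, ho, Bool.false_eq_true, if_false]
    split
    · apply ih'
    · split <;> split <;> apply ih'

-- once best_key is (1,0) and no exact match remains, the loop keeps its best
lemma loopB_skip (al : String) (aw : PySem.Set String) (l : List String)
    (h : ∀ o ∈ l, exactP al o = false) (b : String) :
    loopB al aw b (1, 0) l = PySem.Str.strip b := by
  induction l with
  | nil => rfl
  | cons o l ih =>
    have ho := h o (by simp)
    have ih' := ih (fun x hx => h x (by simp [hx]))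
    simp only [loopB, ho, Bool.false_eq_true, if_false]
    rw [if_pos (by simp [pyGtNN])]
    exact ih'

-- a tier-0 prefix only moves the loop to another tier-0 state
lemma loopB_t0 (al : String) (aw : PySem.Set String) (l : List String)
    (h : ∀ o ∈ l, exactP al o = false ∧ partP al o = false) (tail : List String) :
    ∀ (b : String) (s : Int), ∃ (b' : String) (s' : Int),
      loopB al aw b (0, s) (l ++ tail) = loopB al aw b' (0, s') tail := by
  induction l with
  | nil => intro b s; exact ⟨b, s, rfl⟩
  | cons o l ih =>
    intro b s
    have ho := h o (by simp)
    have ih' := ih (fun x hx => h x (by simp [hx])) 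
    simp only [List.cons_append, loopB, ho.1, ho.2, Bool.false_eq_true, if_false]
    rw [if_neg (by simp [pyGtNN])]
    split
    · exact ih' o (scoreW aw o)
    · exact ih' b s

-- the all-tier-0 case: the loop computes A's fuzzy fold
lemma loopB_fuzzy (al : String) (aw : PySem.Set String) (l : List String)
    (h : ∀ o ∈ l, exactP al o = false ∧ partP al o = false) (b0 : String) :
    ∀ (m : Option String) (s : Int),
      loopB al aw (match m with | none => b0 | some x => x) (0, s) l =
        PySem.Str.strip (match (l.foldl (stepA aw) (m, s)).1 with | none => b0 | some x => x) := by
  induction l with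
  | nil => intro m s; rfl
  | cons o l ih =>
    intro m s
    have ho := h o (by simp)
    have ih' := ih (fun x hx => h x (by simp [hx]))
    simp only [List.foldl_cons, loopB, stepA, ho.1, ho.2, Bool.false_eq_true, if_false]
    rw [if_neg (by simp [pyGtNN])]
    by_cases hc : s < scoreW aw o
    · rw [if_pos (by simp [pyGtNN, hc]), if_pos hc]
      exact ih' (some o) (scoreW aw o)
    · rw [if_neg (by simp [pyGtNN, hc]), if_neg hc]
      exact ih' m s

-- ===== VERDICT (by name: the statement is the Claim_ definition above) =====
theorem match_option_py_spec : Claim_equal_match_option_py := by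
  intro answer options _
  unfold Spec_match_option_py
  cases options with
  | nil => rfl
  | cons o0 rest =>
    simp only [match_option_py, match_option_py_alt]
    set al := PySem.Str.lower (PySem.Str.strip answer) with hal
    set aw := PySem.Set.ofList (PySem.Str.split₀ al) with haw
    set opts := o0 :: rest with hopts
    cases h1 : opts.find? (exactP al) with
    | some e =>
      obtain ⟨he, l1, l2, hsplit, hpre⟩ := List.find?_eq_some_iff_append.mp h1
      show PySem.Str.strip e = loopB al aw o0 (0, 0) opts
      rw [hsplit, loopB_exact al aw l1 l2 e (fun x hx => by simpa using hpre x hx) he]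
    | none =>
      have hnoex : ∀ o ∈ opts, exactP al o = false := by
        intro o ho
        simpa using List.find?_eq_none.mp h1 o ho
      cases h2 : opts.find? (partP al) with
      | some p =>
        obtain ⟨hp, l1, l2, hsplit, hpre⟩ := List.find?_eq_some_iff_append.mp h2
        have ht0 : ∀ o ∈ l1, exactP al o = false ∧ partP al o = false := fun x hx =>
          ⟨hnoex x (by rw [hsplit]; simp [hx]), by simpa using hpre x hx⟩
        show PySem.Str.strip p = loopB al aw o0 (0, 0) opts
        rw [hsplit]
        obtain ⟨b', s', hrun⟩ := loopB_t0 al aw l1 ht0 (p :: l2) o0 0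
        rw [hrun]
        have hep : exactP al p = false := hnoex p (by rw [hsplit]; simp)
        simp only [loopB, hep, Bool.false_eq_true, if_false, hp, if_true]
        rw [if_neg (by simp [pyGtNN]), if_pos (by simp [pyGtNN])]
        rw [loopB_skip al aw l2 (fun x hx => hnoex x (by rw [hsplit]; simp [hx])) p]
      | none =>
        have hnopar : ∀ o ∈ opts, partP al o = false := by
          intro o ho
          simpa using List.find?_eq_none.mp h2 o ho
        have hsim := loopB_fuzzy al aw opts (fun o ho => ⟨hnoex o ho, hnopar o ho⟩) o0 none 0
        simp only at hsim
        show (match (List.foldl (stepA aw) (none, 0) opts).1 with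
              | some o => PySem.Str.strip o
              | none => PySem.Str.strip o0) = loopB al aw o0 (0, 0) opts
        rw [hsim]
        cases (opts.foldl (stepA aw) (none, 0)).1 <;> rfl
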